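-- pv_equiv track=rewrite | github.com/TheTomcat/AdventOfCode | year_2019/day_15_2019.py | longest_line
-- ===== SOURCE A (Python) =====
-- from collections import defaultdict, deque
--
-- def neighbours(position):
--     yield position[0]+1, position[1]
--     yield position[0]-1, position[1]
--     yield position[0], position[1]+1
--     yield position[0], position[1]-1
--
-- def longest_line(map, start):
--     distances = {}
--     distances[start] = 0 # i.e., explored
--     frontier = deque()
--     frontier.append(start)
--     while frontier:
--         position = frontier.popleft()
--         for neighbour in neighbours(position):
--             if map.get(neighbour, 0) != 0 and neighbour not in distances:
--                 distances[neighbour] = distances[position] + 1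
--                 frontier.append(neighbour)
--     return distances
-- ===== SOURCE B (Python) =====
-- def longest_line(map, start):
--     distances = {start: 0}
--     frontier = [start]
--     d = 0
--     while frontier:
--         next_frontier = []
--         for (x, y) in frontier:
--             for n in ((x + 1, y), (x - 1, y), (x, y + 1), (x, y - 1)):
--                 if map.get(n, 0) != 0 and n not in distances:
--                     distances[n] = d + 1
--                     next_frontier.append(n)
--         frontier = next_frontier
--         d += 1
--     return distances
-- ===== Notes on version B (the rewrite author's own statement) =====
-- stated objective: alternative
-- what changed: Replaces the single deque-drain BFS (per-cell distance looked up in the dict) with a level-by-level BFS: an outer loop over distance layers with an explicit distance counter d, and an inner pass over the current frontier list that collects the next layer; no deque and no per-cell distance lookup.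
import Mathlib
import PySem

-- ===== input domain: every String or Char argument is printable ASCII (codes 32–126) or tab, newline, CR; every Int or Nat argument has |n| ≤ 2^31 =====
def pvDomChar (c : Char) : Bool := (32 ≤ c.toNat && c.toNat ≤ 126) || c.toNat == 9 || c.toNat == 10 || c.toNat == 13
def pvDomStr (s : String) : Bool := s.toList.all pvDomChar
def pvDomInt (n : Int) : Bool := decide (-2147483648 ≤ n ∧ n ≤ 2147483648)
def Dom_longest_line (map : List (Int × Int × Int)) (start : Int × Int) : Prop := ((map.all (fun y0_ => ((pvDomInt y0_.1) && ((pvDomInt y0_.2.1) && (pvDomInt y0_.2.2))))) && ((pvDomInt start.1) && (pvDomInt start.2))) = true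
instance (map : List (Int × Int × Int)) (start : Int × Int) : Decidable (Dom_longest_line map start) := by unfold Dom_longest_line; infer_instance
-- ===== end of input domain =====

-- B replaces A's single deque-drain BFS by a level-by-level BFS (outer loop over
-- distance layers with an explicit counter d, inner pass over the frontier list);
-- objective: alternative decomposition, same asymptotic cost, same return value.

-- ===== PORT A =====
-- The map argument is a Python dict (key (x,y), value v, flattened to (x,y,v));
-- map.get(n, 0) is ported through PySem.Dict built from the association list.
abbrev pvDist : Type := PySem.Dict (Int × Int) Int

def pvMGet (m : List (Int × Int × Int)) (n : Int × Int) : Int :=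
  (PySem.Dict.ofList (m.map (fun e => ((e.1, e.2.1), e.2.2)))).getD n 0

-- helper 'neighbours' of A (generator, materialised in yield order)
def neighbours (p : Int × Int) : List (Int × Int) :=
  [(p.1 + 1, p.2), (p.1 - 1, p.2), (p.1, p.2 + 1), (p.1, p.2 - 1)]

-- body of A's inner 'for neighbour in neighbours(position)' loop; state = (distances, frontier).
-- distances[position] is read from the current dict at each insertion, as in the Python;
-- Python's distances[position] cannot raise here (position is always a key), so getD is exact.
def pvAVisit (m : List (Int × Int × Int)) (p : Int × Int)
    (st : pvDist × List (Int × Int)) (n : Int × Int) : pvDist × List (Int × Int) :=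
  if pvMGet m n ≠ 0 ∧ st.1.contains n = false then
    (st.1.insert n (st.1.getD p 0 + 1), st.2 ++ [n])
  else st

-- termination measure machinery (used by both loops' decreasing_by, not by the algorithms)
def pvKeys (m : List (Int × Int × Int)) : Finset (Int × Int) :=
  (m.map (fun e => (e.1, e.2.1))).toFinset

def pvUndisc (m : List (Int × Int × Int)) (dist : pvDist) : Nat :=
  ((pvKeys m).filter (fun k => dist.contains k = false)).card

lemma pvMGet_mem (m : List (Int × Int × Int)) {n : Int × Int}
    (h : pvMGet m n ≠ 0) : n ∈ pvKeys m := by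
  by_contra hn
  have hc : (PySem.Dict.ofList (m.map (fun e => ((e.1, e.2.1), e.2.2)))).contains n = false := by
    by_contra hcc
    have hcc' : (PySem.Dict.ofList (m.map (fun e => ((e.1, e.2.1), e.2.2)))).contains n = true := by
      revert hcc; cases (PySem.Dict.ofList (m.map (fun e => ((e.1, e.2.1), e.2.2)))).contains n <;> simp
    rw [PySem.Dict.contains_iff_mem_keys] at hcc'
    unfold PySem.Dict.ofList PySem.Dict.update at hcc'
    rw [PySem.Dict.keys_foldl_insert_key (m.map (fun e => ((e.1, e.2.1), e.2.2))) Prod.fst (fun d x => x.2)] at hcc'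
    apply hn
    unfold pvKeys
    rw [List.mem_toFinset]
    simpa [PySem.Set.mem_update, List.map_map, Function.comp] using hcc'
  exact h (PySem.Dict.getD_of_not_contains _ 0 hc)

lemma pvUndisc_insert (m : List (Int × Int × Int)) {dist : pvDist} {n : Int × Int} (v : Int)
    (hk : n ∈ pvKeys m) (hc : dist.contains n = false) :
    pvUndisc m (dist.insert n v) + 1 = pvUndisc m dist := by
  unfold pvUndisc
  have hset : (pvKeys m).filter (fun k => (dist.insert n v).contains k = false)
      = ((pvKeys m).filter (fun k => dist.contains k = false)).erase n := by
    ext k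
    simp only [Finset.mem_filter, Finset.mem_erase, PySem.Dict.contains_insert,
      Bool.or_eq_false_iff, beq_eq_false_iff_ne]
    tauto
  have hmem : n ∈ (pvKeys m).filter (fun k => dist.contains k = false) :=
    Finset.mem_filter.2 ⟨hk, hc⟩
  rw [hset, Finset.card_erase_of_mem hmem]
  have : 0 < ((pvKeys m).filter (fun k => dist.contains k = false)).card :=
    Finset.card_pos.2 ⟨n, hmem⟩
  omega

-- a visit step either skips, or inserts one fresh map key and appends it
def pvStepOK (m : List (Int × Int × Int))
    (f : pvDist × List (Int × Int) → (Int × Int) → pvDist × List (Int × Int)) : Prop :=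
  ∀ st n, f st n = st ∨
    (pvMGet m n ≠ 0 ∧ st.1.contains n = false ∧ ∃ v, f st n = (st.1.insert n v, st.2 ++ [n]))

lemma pvAVisit_ok (m : List (Int × Int × Int)) (p : Int × Int) : pvStepOK m (pvAVisit m p) := by
  intro st n
  unfold pvAVisit
  split_ifs with h
  · exact Or.inr ⟨h.1, h.2, _, rfl⟩
  · exact Or.inl rfl

lemma pvFold_meas (m : List (Int × Int × Int))
    (f : pvDist × List (Int × Int) → (Int × Int) → pvDist × List (Int × Int))
    (hf : pvStepOK m f) :
    ∀ (ns : List (Int × Int)) (st : pvDist × List (Int × Int)),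
      pvUndisc m (ns.foldl f st).1 + (ns.foldl f st).2.length ≤ pvUndisc m st.1 + st.2.length
      ∧ st.2.length ≤ (ns.foldl f st).2.length := by
  intro ns
  induction ns with
  | nil => intro st; exact ⟨le_refl _, le_refl _⟩
  | cons n t ih =>
    intro st
    simp only [List.foldl_cons]
    rcases hf st n with h | ⟨hm, hc, v, h⟩
    · rw [h]; exact ih st
    · rw [h]
      have h2 := ih (st.1.insert n v, st.2 ++ [n])
      have h3 := pvUndisc_insert m v (pvMGet_mem m hm) hc
      simp only [List.length_append, List.length_cons, List.length_nil] at h2 ⊢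
      omega

def pvALoop (m : List (Int × Int × Int)) (dist : pvDist) (q : List (Int × Int)) : pvDist :=
  match q with
  | [] => dist
  | p :: rest =>
    let st := (neighbours p).foldl (pvAVisit m p) (dist, rest)
    pvALoop m st.1 st.2
termination_by 5 * pvUndisc m dist + q.length
decreasing_by
  have h := pvFold_meas m (pvAVisit m p) (pvAVisit_ok m p) (neighbours p) (dist, rest)
  simp only [List.length_cons] at h ⊢
  omega

def longest_line (map : List (Int × Int × Int)) (start : Int × Int) : List (Int × Int × Int) :=
  let distances : pvDist := PySem.Dict.empty.insert start 0
  (pvALoop map distances [start]).items.map (fun e => (e.1.1, e.1.2, e.2))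

-- ===== PORT B =====
-- body of B's inner neighbour loop: the new distance is d + 1 from the layer counter
def pvBVisit (m : List (Int × Int × Int)) (d : Int)
    (st : pvDist × List (Int × Int)) (n : Int × Int) : pvDist × List (Int × Int) :=
  if pvMGet m n ≠ 0 ∧ st.1.contains n = false then
    (st.1.insert n (d + 1), st.2 ++ [n])
  else st

lemma pvBVisit_ok (m : List (Int × Int × Int)) (d : Int) : pvStepOK m (pvBVisit m d) := by
  intro st n
  unfold pvBVisit
  split_ifs with h
  · exact Or.inr ⟨h.1, h.2, _, rfl⟩
  · exact Or.inl rfl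

-- B's 'for (x, y) in frontier' body: scan the four neighbour tuples
def pvBCell (m : List (Int × Int × Int)) (d : Int)
    (st : pvDist × List (Int × Int)) (p : Int × Int) : pvDist × List (Int × Int) :=
  [(p.1 + 1, p.2), (p.1 - 1, p.2), (p.1, p.2 + 1), (p.1, p.2 - 1)].foldl (pvBVisit m d) st

lemma pvLayer_meas (m : List (Int × Int × Int)) (d : Int) :
    ∀ (cur : List (Int × Int)) (st : pvDist × List (Int × Int)),
      pvUndisc m (cur.foldl (pvBCell m d) st).1 + (cur.foldl (pvBCell m d) st).2.length
        ≤ pvUndisc m st.1 + st.2.length := by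
  intro cur
  induction cur with
  | nil => intro st; exact le_refl _
  | cons p rest ih =>
    intro st
    simp only [List.foldl_cons]
    have h1 := (pvFold_meas m (pvBVisit m d) (pvBVisit_ok m d)
      [(p.1 + 1, p.2), (p.1 - 1, p.2), (p.1, p.2 + 1), (p.1, p.2 - 1)] st).1
    have h2 := ih (pvBCell m d st p)
    unfold pvBCell at h2 ⊢
    omega

def pvBLoop (m : List (Int × Int × Int)) (dist : pvDist) (cur : List (Int × Int)) (d : Int) : pvDist :=
  if cur = [] then dist
  else
    let st := cur.foldl (pvBCell m d) (dist, [])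
    pvBLoop m st.1 st.2 (d + 1)
termination_by 2 * pvUndisc m dist + (if cur = [] then 0 else 1)
decreasing_by
  rename_i hcur
  simp only [List.foldl_attach]
  have h := pvLayer_meas m d cur (dist, [])
  simp only [List.length_nil] at h
  rw [if_neg hcur]
  split_ifs with h2
  · rw [h2] at h; simp only [List.length_nil] at h; omega
  · have : 0 < (cur.foldl (pvBCell m d) (dist, [])).2.length :=
      List.length_pos_of_ne_nil h2
    omega

def longest_line_alt (map : List (Int × Int × Int)) (start : Int × Int) : List (Int × Int × Int) :=
  let distances : pvDist := PySem.Dict.empty.insert start 0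
  (pvBLoop map distances [start] 0).items.map (fun e => (e.1.1, e.1.2, e.2))

-- ===== PRECONDITION & SPEC =====
def Spec_longest_line (map : List (Int × Int × Int)) (start : Int × Int) (out : List (Int × Int × Int)) : Prop := out = longest_line_alt map start
instance (map : List (Int × Int × Int)) (start : Int × Int) (out : List (Int × Int × Int)) : Decidable (Spec_longest_line map start out) := by unfold Spec_longest_line; infer_instance

-- ===== CLAIM (what is proved, stated in full; the proofs are below) =====
def Claim_equal_longest_line : Prop := ∀ (map : List (Int × Int × Int)) (start : Int × Int), Dom_longest_line map start → Spec_longest_line map start (longest_line map start)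

-- ===== LEMMAS AND PROOFS =====

lemma pvALoop_nil (m : List (Int × Int × Int)) (dist : pvDist) : pvALoop m dist [] = dist := by
  rw [pvALoop]

lemma pvALoop_cons (m : List (Int × Int × Int)) (dist : pvDist) (p : Int × Int) (rest : List (Int × Int)) :
    pvALoop m dist (p :: rest)
      = pvALoop m ((neighbours p).foldl (pvAVisit m p) (dist, rest)).1
          ((neighbours p).foldl (pvAVisit m p) (dist, rest)).2 := by
  rw [pvALoop]

lemma pvBLoop_nil (m : List (Int × Int × Int)) (dist : pvDist) (d : Int) :
    pvBLoop m dist [] d = dist := by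
  rw [pvBLoop]; simp

lemma pvBLoop_ne (m : List (Int × Int × Int)) (dist : pvDist) {cur : List (Int × Int)} (d : Int)
    (h : cur ≠ []) :
    pvBLoop m dist cur d
      = pvBLoop m (cur.foldl (pvBCell m d) (dist, [])).1 (cur.foldl (pvBCell m d) (dist, [])).2 (d + 1) := by
  rw [pvBLoop]; simp [h]

lemma pvFold_get? (m : List (Int × Int × Int))
    (f : pvDist × List (Int × Int) → (Int × Int) → pvDist × List (Int × Int))
    (hf : pvStepOK m f) :
    ∀ (ns : List (Int × Int)) (st : pvDist × List (Int × Int)) (k : Int × Int) (v : Int),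
      st.1.get? k = some v → ((ns.foldl f st).1).get? k = some v := by
  intro ns
  induction ns with
  | nil => intro st k v h; exact h
  | cons n t ih =>
    intro st k v h
    simp only [List.foldl_cons]
    rcases hf st n with he | ⟨hm, hc, w, he⟩
    · rw [he]; exact ih st k v h
    · rw [he]
      apply ih
      have hkn : k ≠ n := by
        intro e
        rw [e, (PySem.Dict.get?_eq_none_iff_contains st.1 n).2 hc] at h
        cases h
      rw [PySem.Dict.get?_insert_of_ne _ _ hkn]
      exact h

-- A's neighbour scan equals B's once distances[position] = d is known
lemma pvCell_eq (m : List (Int × Int × Int)) (d : Int) (p : Int × Int) :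
    ∀ (ns : List (Int × Int)) (dist : pvDist) (q : List (Int × Int)),
      dist.get? p = some d →
      ns.foldl (pvAVisit m p) (dist, q) = ns.foldl (pvBVisit m d) (dist, q) := by
  intro ns
  induction ns with
  | nil => intro dist q _; rfl
  | cons n t ih =>
    intro dist q hp
    simp only [List.foldl_cons]
    by_cases hcond : pvMGet m n ≠ 0 ∧ dist.contains n = false
    · have hA : pvAVisit m p (dist, q) n = (dist.insert n (d + 1), q ++ [n]) := by
        unfold pvAVisit
        rw [if_pos hcond]
        have : (dist, q).1.getD p 0 = d := by
          rw [PySem.Dict.getD_eq_get?_getD]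
          simp [hp]
        rw [this]
      have hB : pvBVisit m d (dist, q) n = (dist.insert n (d + 1), q ++ [n]) := by
        unfold pvBVisit
        rw [if_pos hcond]
      rw [hA, hB]
      apply ih
      have hpn : p ≠ n := by
        intro e
        rw [e, (PySem.Dict.get?_eq_none_iff_contains dist n).2 hcond.2] at hp
        cases hp
      rw [PySem.Dict.get?_insert_of_ne _ _ hpn]
      exact hp
    · have hA : pvAVisit m p (dist, q) n = (dist, q) := by
        unfold pvAVisit; rw [if_neg hcond]
      have hB : pvBVisit m d (dist, q) n = (dist, q) := by
        unfold pvBVisit; rw [if_neg hcond]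
      rw [hA, hB]
      exact ih dist q hp

-- the queue component of a neighbour scan is 'initial queue ++ the new cells'
lemma pvBFold_queue (m : List (Int × Int × Int)) (d : Int) :
    ∀ (ns : List (Int × Int)) (dist : pvDist) (q : List (Int × Int)),
      ns.foldl (pvBVisit m d) (dist, q)
        = ((ns.foldl (pvBVisit m d) (dist, [])).1,
           q ++ (ns.foldl (pvBVisit m d) (dist, [])).2) := by
  intro ns
  induction ns with
  | nil => intro dist q; simp
  | cons n t ih =>
    intro dist q
    simp only [List.foldl_cons]
    by_cases hcond : pvMGet m n ≠ 0 ∧ dist.contains n = false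
    · have hq : pvBVisit m d (dist, q) n = (dist.insert n (d + 1), q ++ [n]) := by
        unfold pvBVisit; rw [if_pos hcond]
      have h0 : pvBVisit m d (dist, []) n = (dist.insert n (d + 1), [n]) := by
        unfold pvBVisit; rw [if_pos hcond]; rfl
      rw [hq, h0, ih (dist.insert n (d + 1)) (q ++ [n]), ih (dist.insert n (d + 1)) [n]]
      simp
    · have hq : pvBVisit m d (dist, q) n = (dist, q) := by
        unfold pvBVisit; rw [if_neg hcond]
      have h0 : pvBVisit m d (dist, []) n = (dist, []) := by
        unfold pvBVisit; rw [if_neg hcond]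
      rw [hq, h0, ih dist q]

-- every cell in the produced queue carries distance d + 1
lemma pvBFold_inv (m : List (Int × Int × Int)) (d : Int) :
    ∀ (ns : List (Int × Int)) (st : pvDist × List (Int × Int)),
      (∀ x ∈ st.2, st.1.get? x = some (d + 1)) →
      ∀ x ∈ (ns.foldl (pvBVisit m d) st).2, ((ns.foldl (pvBVisit m d) st).1).get? x = some (d + 1) := by
  intro ns
  induction ns with
  | nil => intro st h; exact h
  | cons n t ih =>
    intro st h
    simp only [List.foldl_cons]
    rcases pvBVisit_ok m d st n with he | ⟨hm, hc, w, he⟩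
    · rw [he]; exact ih st h
    · have hw : w = d + 1 := by
        unfold pvBVisit at he
        split_ifs at he with hcond
        · have := congrArg (fun s => s.1) he
          simp only at this
          have h2 := congrArg (fun dd => PySem.Dict.get? dd n) this
          simp only [PySem.Dict.get?_insert_self] at h2
          exact (Option.some_inj.1 h2).symm
        · have := congrArg (fun s => s.2.length) he
          simp at this
      subst hw
      rw [he]
      apply ih
      intro x hx
      rcases List.mem_append.1 hx with hx | hx
      · have hxn : x ≠ n := by
          intro e
          have := h x hx
          rw [e, (PySem.Dict.get?_eq_none_iff_contains st.1 n).2 hc] at this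
          cases this
        rw [PySem.Dict.get?_insert_of_ne _ _ hxn]
        exact h x hx
      · simp only [List.mem_singleton] at hx
        subst hx
        exact PySem.Dict.get?_insert_self _ _ _
lemma pvLayer_inv (m : List (Int × Int × Int)) (d : Int) :
    ∀ (cur : List (Int × Int)) (st : pvDist × List (Int × Int)),
      (∀ x ∈ st.2, st.1.get? x = some (d + 1)) →
      ∀ x ∈ (cur.foldl (pvBCell m d) st).2, ((cur.foldl (pvBCell m d) st).1).get? x = some (d + 1) := by
  intro cur
  induction cur with
  | nil => intro st h; exact h
  | cons p rest ih =>
    intro st h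
    simp only [List.foldl_cons]
    apply ih
    unfold pvBCell
    exact pvBFold_inv m d _ st h

-- draining A's queue layer by layer is B's layer fold
lemma pvDrain (m : List (Int × Int × Int)) (d : Int) :
    ∀ (cur : List (Int × Int)) (dist : pvDist) (acc : List (Int × Int)),
      (∀ p ∈ cur, dist.get? p = some d) →
      pvALoop m dist (cur ++ acc)
        = pvALoop m (cur.foldl (pvBCell m d) (dist, acc)).1 (cur.foldl (pvBCell m d) (dist, acc)).2 := by
  intro cur
  induction cur with
  | nil => intro dist acc _; simp
  | cons p rest ih =>
    intro dist acc h
    have hp : dist.get? p = some d := h p (List.mem_cons_self ..)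
    rw [List.cons_append, pvALoop_cons]
    rw [pvCell_eq m d p (neighbours p) dist (rest ++ acc) hp]
    rw [pvBFold_queue m d (neighbours p) dist (rest ++ acc)]
    have hcell : pvBCell m d (dist, acc) p
        = ((((neighbours p)).foldl (pvBVisit m d) (dist, [])).1,
           acc ++ ((neighbours p).foldl (pvBVisit m d) (dist, [])).2) := by
      unfold pvBCell neighbours
      exact pvBFold_queue m d _ dist acc
    have hrest : ∀ q ∈ rest, (((neighbours p).foldl (pvBVisit m d) (dist, [])).1).get? q = some d := by
      intro q hq
      exact pvFold_get? m (pvBVisit m d) (pvBVisit_ok m d) (neighbours p) (dist, []) q d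
        (h q (List.mem_cons_of_mem _ hq))
    have := ih (((neighbours p).foldl (pvBVisit m d) (dist, [])).1)
      (acc ++ ((neighbours p).foldl (pvBVisit m d) (dist, [])).2) hrest
    simp only [List.foldl_cons, hcell]
    rw [← this, List.append_assoc]

-- main BFS equivalence, by induction on the number of undiscovered map keys
lemma pvMain (m : List (Int × Int × Int)) :
    ∀ (u : Nat) (dist : pvDist) (cur : List (Int × Int)) (d : Int),
      pvUndisc m dist ≤ u →
      (∀ p ∈ cur, dist.get? p = some d) →
      pvALoop m dist cur = pvBLoop m dist cur d := by
  intro u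
  induction u with
  | zero =>
    intro dist cur d hu hcur
    by_cases hc : cur = []
    · subst hc; rw [pvALoop_nil, pvBLoop_nil]
    · have hd := pvDrain m d cur dist [] hcur
      rw [List.append_nil] at hd
      have hmeas := pvLayer_meas m d cur (dist, [])
      simp only [List.length_nil] at hmeas
      have h2 : (cur.foldl (pvBCell m d) (dist, [])).2 = [] := by
        cases he : (cur.foldl (pvBCell m d) (dist, [])).2 with
        | nil => rfl
        | cons a t => rw [he] at hmeas; simp only [List.length_cons] at hmeas; omega
      rw [hd, h2, pvALoop_nil, pvBLoop_ne m dist d hc, h2, pvBLoop_nil]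
  | succ n ih =>
    intro dist cur d hu hcur
    by_cases hc : cur = []
    · subst hc; rw [pvALoop_nil, pvBLoop_nil]
    · have hd := pvDrain m d cur dist [] hcur
      rw [List.append_nil] at hd
      have hmeas := pvLayer_meas m d cur (dist, [])
      simp only [List.length_nil] at hmeas
      have hnext : ∀ x ∈ (cur.foldl (pvBCell m d) (dist, [])).2,
          ((cur.foldl (pvBCell m d) (dist, [])).1).get? x = some (d + 1) :=
        pvLayer_inv m d cur (dist, []) (by intro x hx; cases hx)
      rw [hd, pvBLoop_ne m dist d hc]
      by_cases h2 : (cur.foldl (pvBCell m d) (dist, [])).2 = []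
      · rw [h2, pvALoop_nil, pvBLoop_nil]
      · have hlen : 0 < (cur.foldl (pvBCell m d) (dist, [])).2.length :=
          List.length_pos_of_ne_nil h2
        exact ih (cur.foldl (pvBCell m d) (dist, [])).1 (cur.foldl (pvBCell m d) (dist, [])).2
          (d + 1) (by omega) hnext

-- ===== VERDICT (by name: the statement is the Claim_ definition above) =====
theorem longest_line_spec : Claim_equal_longest_line := by
  unfold Claim_equal_longest_line
  intro map start _
  unfold Spec_longest_line longest_line longest_line_alt
  have h := pvMain map (pvUndisc map (PySem.Dict.empty.insert start 0))
    (PySem.Dict.empty.insert start 0) [start] 0 (le_refl _)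
    (by
      intro p hp
      simp only [List.mem_singleton] at hp
      subst hp
      exact PySem.Dict.get?_insert_self _ _ _)
  simp only [h]
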